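-- pv_equiv track=rewrite | github.com/SuBinMok/CordingTest | 프로그래머스/0/120843. 공 던지기/공 던지기.py | solution
-- ===== SOURCE A (Python) =====
-- def solution(numbers, k):
--     answer = 0
--     while k > 1:
--         k-=1
--         remove = numbers.pop(0)
--         numbers.append(remove)
--         remove = numbers.pop(0)
--         numbers.append(remove)
--     answer = numbers.pop(0)
--     return answer
-- ===== SOURCE B (Python) =====
-- def solution(numbers, k):
--     r = 2 * max(k - 1, 0) % len(numbers)
--     answer = numbers[r]
--     numbers[:] = numbers[r + 1:] + numbers[:r]
--     return answer
-- ===== Notes on version B (the rewrite author's own statement) =====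
-- stated objective: faster
-- what changed: Replaced the while-loop of k-1 double pop(0)/append rotations by a closed-form index r = 2*max(k-1,0) % len(numbers) plus one slice assignment for the in-place mutation.
-- outside the precondition, e.g. on solution([], 3): A raises IndexError, B raises ZeroDivisionError
import Mathlib
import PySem

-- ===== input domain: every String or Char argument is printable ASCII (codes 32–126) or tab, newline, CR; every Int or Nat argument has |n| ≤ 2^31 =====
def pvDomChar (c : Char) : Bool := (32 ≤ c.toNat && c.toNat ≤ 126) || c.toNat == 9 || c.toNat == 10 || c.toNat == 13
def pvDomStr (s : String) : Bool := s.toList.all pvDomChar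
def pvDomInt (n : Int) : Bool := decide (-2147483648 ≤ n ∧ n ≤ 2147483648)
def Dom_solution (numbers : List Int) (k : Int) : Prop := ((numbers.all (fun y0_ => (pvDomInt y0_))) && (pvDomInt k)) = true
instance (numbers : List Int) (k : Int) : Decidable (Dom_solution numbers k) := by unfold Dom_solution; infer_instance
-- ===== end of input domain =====

-- ===== PORT A =====
-- Python's `while k > 1` rotates the list left by two, k-1 times, then pops the front.
-- (A mutates `numbers` in place; B performs the same mutation in Python, and the
-- equivalence proved here is about the return value.)
def solutionLoop : Nat → List Int → List Int
  | 0, ns => ns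
  | m + 1, ns =>
    match ns with
    | [] => []            -- Python: pop(0) raises IndexError here (excluded by Pre_)
    | x :: rest =>
      match rest ++ [x] with
      | [] => []
      | y :: rest2 => solutionLoop m (rest2 ++ [y])

def solution (numbers : List Int) (k : Int) : Int :=
  match solutionLoop (k - 1).toNat numbers with
  | [] => 0               -- Python: final pop(0) raises IndexError here (excluded by Pre_)
  | a :: _ => a

-- ===== PORT B =====
-- closed-form rotation index; the slice assignment of Source B is a mutation, not part of the return value
def solution_alt (numbers : List Int) (k : Int) : Int :=
  let r := PySem.Int.mod (2 * max (k - 1) 0) numbers.length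
  (PySem.List.pyGet? numbers r).getD 0

-- ===== PRECONDITION & SPEC =====
-- Pre_ excludes only the empty list, on which A raises IndexError (B raises ZeroDivisionError).
def Pre_solution (numbers : List Int) (k : Int) : Prop := numbers ≠ []
instance (numbers : List Int) (k : Int) : Decidable (Pre_solution numbers k) := by unfold Pre_solution; infer_instance
def pvWitness_solution : List Int × Int := ([1, 2, 3], 2)
def Spec_solution (numbers : List Int) (k : Int) (out : Int) : Prop := out = solution_alt numbers k
instance (numbers : List Int) (k : Int) (out : Int) : Decidable (Spec_solution numbers k out) := by unfold Spec_solution; infer_instance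

-- ===== CLAIM (what is proved, stated in full; the proofs are below) =====
def Claim_equal_solution : Prop := ∀ (numbers : List Int) (k : Int), Dom_solution numbers k → Pre_solution numbers k → Spec_solution numbers k (solution numbers k)

-- ===== LEMMAS AND PROOFS =====
theorem solutionLoop_eq_rotate (m : Nat) (ns : List Int) (h : ns ≠ []) :
    solutionLoop m ns = ns.rotate (2 * m) := by
  induction m generalizing ns with
  | zero => simp [solutionLoop]
  | succ m ih =>
    rcases ns with _ | ⟨x, rest⟩
    · exact absurd rfl h
    rcases e : rest ++ [x] with _ | ⟨y, rest2⟩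
    · exact absurd e (by simp)
    have h2 : (x :: rest).rotate 2 = rest2 ++ [y] := by
      have : (x :: rest).rotate (1 + 1) = rest2 ++ [y] := by
        rw [List.rotate_cons_succ, e, List.rotate_cons_succ, List.rotate_zero]
      simpa using this
    have hne : rest2 ++ [y] ≠ [] := by simp
    calc solutionLoop (m + 1) (x :: rest) = solutionLoop m (rest2 ++ [y]) := by
            simp [solutionLoop, e]
      _ = (rest2 ++ [y]).rotate (2 * m) := ih _ hne
      _ = ((x :: rest).rotate 2).rotate (2 * m) := by rw [h2]
      _ = (x :: rest).rotate (2 * (m + 1)) := by rw [List.rotate_rotate]; ring_nf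

-- ===== VERDICT (by name: the statement is the Claim_ definition above) =====
theorem solution_spec : Claim_equal_solution := by
  intro numbers k _ hpre
  unfold Spec_solution solution solution_alt
  have hn : 0 < numbers.length := List.length_pos_iff.mpr hpre
  set m := (k - 1).toNat with hm
  rw [solutionLoop_eq_rotate _ _ hpre]
  have hmax : 2 * max (k - 1) 0 = ((2 * m : Nat) : Int) := by
    rw [← Int.toNat_eq_max]; push_cast; ring
  have hr : PySem.Int.mod (2 * max (k - 1) 0) (numbers.length : Int)
      = ((2 * m % numbers.length : Nat) : Int) := by
    rw [hmax]; exact PySem.Int.mod_natCast _ _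
  have hlt : 2 * m % numbers.length < numbers.length := Nat.mod_lt _ hn
  rcases e : numbers.rotate (2 * m) with _ | ⟨a, t⟩
  · exact absurd (List.rotate_eq_nil_iff.mp e) hpre
  have ha : a = numbers[2 * m % numbers.length] := by
    have h0 : 0 < (numbers.rotate (2 * m)).length := by rw [e]; simp
    have := List.getElem_rotate numbers (2 * m) 0 h0
    simpa [e] using this
  show a = (PySem.List.pyGet? numbers (PySem.Int.mod (2 * max (k - 1) 0) (numbers.length : Int))).getD 0
  rw [ha, hr, PySem.List.pyGet?_natCast, List.getElem?_eq_getElem hlt, Option.getD_some]
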